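-- pv_equiv track=rewrite | github.com/inhomun/algorithm_example | coding_test/runningContest.py | solution
-- ===== SOURCE A (Python) =====
-- def solution(code):
--     mode = 0
--     arr = []
--     for idx, i in enumerate(code):
--         if i == '1':
--             mode = 0 if mode == 1 else 1
--         elif mode == 0:
--             if idx % 2 == 0:
--                 arr.append(i)
--         elif mode == 1:
--             if idx % 2 == 1:
--                 arr.append(i)
--
--     answer = ''.join(arr)
--     if answer == '':
--         return 'EMPTY'
--     else:
--         return answer
-- ===== SOURCE B (Python) =====
-- def solution(code):
--     # pass 1: prefix counts of '1's (pref[i] = number of '1's before index i)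
--     pref = [0]
--     for c in code:
--         pref.append(pref[-1] + (c == '1'))
--     # pass 2: keep chars whose preceding-'1' parity matches the index parity
--     ans = ''.join(c for (i, c), p in zip(enumerate(code), pref)
--                   if c != '1' and p % 2 == i % 2)
--     return ans if ans else 'EMPTY'
-- ===== Notes on version B (the rewrite author's own statement) =====
-- stated objective: alternative
-- what changed: Replaces A's single stateful loop with a toggled mode flag by a two-pass decomposition: first build a prefix table counting the toggle characters seen so far, then filter characters where that running parity equals the index parity.
import Mathlib
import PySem

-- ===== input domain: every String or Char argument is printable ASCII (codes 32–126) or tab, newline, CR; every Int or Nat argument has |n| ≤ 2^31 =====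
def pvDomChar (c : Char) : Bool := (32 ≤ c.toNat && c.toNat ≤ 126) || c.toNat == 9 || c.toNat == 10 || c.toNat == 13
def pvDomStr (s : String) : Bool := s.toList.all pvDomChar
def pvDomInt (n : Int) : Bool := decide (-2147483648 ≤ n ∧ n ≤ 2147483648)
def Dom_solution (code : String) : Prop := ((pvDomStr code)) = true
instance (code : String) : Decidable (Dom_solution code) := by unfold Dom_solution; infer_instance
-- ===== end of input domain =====

-- B replaces A's stateful toggle loop by a prefix-count table plus a filtering pass (alternative decomposition, same cost).

-- ===== PORT A =====
-- one stateful pass: (mode, arr), toggling mode on '1'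
def solution (code : String) : String :=
  let st := (PySem.List.enumerate code.toList).foldl
    (fun (s : Int × List Char) p =>
      let mode := s.1
      let arr := s.2
      let idx := p.1
      let i := p.2
      if i == '1' then ((if mode == 1 then (0 : Int) else 1), arr)
      else if mode == 0 then
        (if PySem.Int.mod idx 2 == 0 then (mode, arr ++ [i]) else (mode, arr))
      else if mode == 1 then
        (if PySem.Int.mod idx 2 == 1 then (mode, arr ++ [i]) else (mode, arr))
      else (mode, arr)) ((0 : Int), ([] : List Char))
  let answer := String.mk st.2
  if answer == "" then "EMPTY" else answer

-- ===== PORT B =====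
-- pass 1: prefix counts of '1's; pass 2: filter by parity match
def solution_alt (code : String) : String :=
  let pref : List Int := code.toList.foldl
    (fun acc c => acc ++ [acc.getLast! + (if c == '1' then 1 else 0)]) [(0 : Int)]
  let ans := String.mk (((PySem.List.enumerate code.toList).zip pref).filterMap
    (fun q => if q.1.2 ≠ '1' ∧ PySem.Int.mod q.2 2 = PySem.Int.mod q.1.1 2 then some q.1.2 else none))
  if ans == "" then "EMPTY" else ans

-- ===== PRECONDITION & SPEC =====
def Spec_solution (code : String) (out : String) : Prop := out = solution_alt code
instance (code : String) (out : String) : Decidable (Spec_solution code out) := by unfold Spec_solution; infer_instance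

-- ===== CLAIM (what is proved, stated in full; the proofs are below) =====
def Claim_equal_solution : Prop := ∀ (code : String), Dom_solution code → Spec_solution code (solution code)

-- ===== LEMMAS AND PROOFS =====

-- recursive characterisation of A's loop
def aCore (s mode : Int) : List Char → List Char
  | [] => []
  | c :: cs =>
      if c == '1' then aCore (s + 1) (if mode == 1 then 0 else 1) cs
      else if mode == 0 then
        (if PySem.Int.mod s 2 == 0 then c :: aCore (s + 1) mode cs else aCore (s + 1) mode cs)
      else if mode == 1 then
        (if PySem.Int.mod s 2 == 1 then c :: aCore (s + 1) mode cs else aCore (s + 1) mode cs)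
      else aCore (s + 1) mode cs

-- the prefix-count table (0, then running counts)
def counts (cnt : Int) : List Char → List Int
  | [] => [cnt]
  | c :: cs => cnt :: counts (cnt + (if c == '1' then 1 else 0)) cs

-- recursive characterisation of B's filter pass
def bCore (s cnt : Int) : List Char → List Char
  | [] => []
  | c :: cs =>
      (if c ≠ '1' ∧ PySem.Int.mod cnt 2 = PySem.Int.mod s 2 then [c] else []) ++
        bCore (s + 1) (cnt + (if c == '1' then 1 else 0)) cs

theorem aFold (l : List Char) : ∀ (s mode : Int) (arr : List Char),
    ((PySem.List.enumerate l s).foldl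
      (fun (st : Int × List Char) p =>
        let mode := st.1
        let arr := st.2
        let idx := p.1
        let i := p.2
        if i == '1' then ((if mode == 1 then (0 : Int) else 1), arr)
        else if mode == 0 then
          (if PySem.Int.mod idx 2 == 0 then (mode, arr ++ [i]) else (mode, arr))
        else if mode == 1 then
          (if PySem.Int.mod idx 2 == 1 then (mode, arr ++ [i]) else (mode, arr))
        else (mode, arr)) (mode, arr)).2 = arr ++ aCore s mode l := by
  induction l with
  | nil => intro s mode arr; simp [PySem.List.enumerate_nil, aCore]
  | cons c cs ih =>
      intro s mode arr
      rw [PySem.List.enumerate_cons, List.foldl_cons]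
      by_cases h1 : c == '1'
      · simp only [h1, if_pos, aCore, ih]
      · simp only [aCore, h1, if_neg, Bool.false_eq_true]
        by_cases h0 : mode == 0
        · simp only [h0, if_pos]
          by_cases hp : PySem.Int.mod s 2 == 0
          · simp only [hp, if_pos]
            rw [ih]
            simp
          · simp only [hp, Bool.false_eq_true, if_neg]
            exact ih _ _ _
        · simp only [h0, Bool.false_eq_true, if_neg]
          by_cases hm1 : mode == 1
          · simp only [hm1, if_pos]
            by_cases hp : PySem.Int.mod s 2 == 1
            · simp only [hp, if_pos]
              rw [ih]
              simp
            · simp only [hp, Bool.false_eq_true, if_neg]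
              exact ih _ _ _
          · simp only [hm1, Bool.false_eq_true, if_neg]
            exact ih _ _ _

theorem prefFold (l : List Char) : ∀ (a : List Int) (v : Int),
    l.foldl (fun acc c => acc ++ [acc.getLast! + (if c == '1' then 1 else 0)]) (a ++ [v])
      = a ++ counts v l := by
  induction l with
  | nil => intro a v; simp [counts]
  | cons c cs ih =>
      intro a v
      have hlast : (a ++ [v]).getLast! = v := by
        cases a with
        | nil => rfl
        | cons x xs =>
          rw [show ((x :: xs) ++ [v]).getLast! = ((x :: xs) ++ [v]).getLast (by simp) from rfl]
          exact List.getLast_concat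
      rw [List.foldl_cons, hlast]
      rw [show a ++ [v] ++ [v + (if c == '1' then 1 else 0)]
            = (a ++ [v]) ++ [v + (if c == '1' then 1 else 0)] from rfl, ih]
      simp [counts]

theorem bFilter (l : List Char) : ∀ (s cnt : Int),
    ((PySem.List.enumerate l s).zip (counts cnt l)).filterMap
      (fun q => if q.1.2 ≠ '1' ∧ PySem.Int.mod q.2 2 = PySem.Int.mod q.1.1 2 then some q.1.2 else none)
      = bCore s cnt l := by
  induction l with
  | nil => intro s cnt; simp [PySem.List.enumerate_nil, bCore]
  | cons c cs ih =>
      intro s cnt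
      rw [PySem.List.enumerate_cons]
      simp only [counts, List.zip_cons_cons, List.filterMap_cons]
      rw [ih]
      by_cases hc : c = '1'
      · simp [hc, bCore]
      · by_cases hp : (cnt % 2 : Int) = s % 2
        · simp [hc, hp, bCore]
        · simp [hc, hp, bCore]

theorem core_eq (l : List Char) : ∀ (s cnt : Int), 0 ≤ s → 0 ≤ cnt →
    aCore s (PySem.Int.mod cnt 2) l = bCore s cnt l := by
  induction l with
  | nil => intro s cnt _ _; simp [aCore, bCore]
  | cons c cs ih =>
      intro s cnt hs hc
      have h2 : (0 : Int) < 2 := by norm_num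
      rw [PySem.Int.mod_eq_emod_of_pos h2]
      have hm : cnt % 2 = 0 ∨ cnt % 2 = 1 := by omega
      have ht : s % 2 = 0 ∨ s % 2 = 1 := by omega
      by_cases h1 : c = '1'
      · subst h1
        simp only [aCore, bCore, beq_self_eq_true, if_pos, ne_eq, not_true_eq_false,
          false_and, if_neg, not_false_eq_true, List.nil_append, if_true]
        have key : (if (cnt % 2 : Int) == 1 then (0 : Int) else 1)
            = PySem.Int.mod (cnt + 1) 2 := by
          rw [PySem.Int.mod_eq_emod_of_pos h2]
          rcases hm with h | h <;> simp [h] <;> omega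
        rw [key]
        exact ih (s + 1) (cnt + 1) (by omega) (by omega)
      · have hb : (c == '1') = false := by simp [h1]
        have tail : aCore (s + 1) ((cnt % 2 : Int)) cs = bCore (s + 1) cnt cs := by
          have := ih (s + 1) cnt (by omega) hc
          rwa [PySem.Int.mod_eq_emod_of_pos h2] at this
        have hsmod : PySem.Int.mod s 2 = s % 2 := PySem.Int.mod_eq_emod_of_pos h2
        simp only [aCore, bCore, hb, Bool.false_eq_true, if_neg, ne_eq, h1,
          not_false_eq_true, true_and, hsmod, if_true]
        have hadd : cnt + (if (c == '1') = true then (1:Int) else 0) = cnt := by simp [hb]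
        rw [hadd] at *
        rw [tail]
        rcases hm with hm | hm <;> rcases ht with ht | ht <;> simp [hm, ht]

theorem list_eq (l : List Char) :
    (((PySem.List.enumerate l (0:Int)).foldl
      (fun (st : Int × List Char) p =>
        let mode := st.1
        let arr := st.2
        let idx := p.1
        let i := p.2
        if i == '1' then ((if mode == 1 then (0 : Int) else 1), arr)
        else if mode == 0 then
          (if PySem.Int.mod idx 2 == 0 then (mode, arr ++ [i]) else (mode, arr))
        else if mode == 1 then
          (if PySem.Int.mod idx 2 == 1 then (mode, arr ++ [i]) else (mode, arr))
        else (mode, arr)) ((0:Int), ([] : List Char))).2)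
    = ((PySem.List.enumerate l (0:Int)).zip
        (l.foldl (fun acc c => acc ++ [acc.getLast! + (if c == '1' then 1 else 0)]) [(0:Int)])).filterMap
      (fun q => if q.1.2 ≠ '1' ∧ PySem.Int.mod q.2 2 = PySem.Int.mod q.1.1 2 then some q.1.2 else none) := by
  rw [aFold l 0 0 []]
  rw [show ([(0:Int)]) = ([] : List Int) ++ [(0:Int)] from rfl, prefFold l [] 0]
  simp only [List.nil_append]
  rw [bFilter l 0 0]
  have := core_eq l 0 0 le_rfl le_rfl
  simpa [PySem.Int.mod] using this

-- ===== VERDICT (by name: the statement is the Claim_ definition above) =====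
theorem solution_spec : Claim_equal_solution := by
  intro code _
  unfold Spec_solution solution solution_alt
  simp only []
  rw [list_eq code.toList]
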